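-- pv_equiv track=rewrite | github.com/josteint/sidfinity | src/converters/regtrace_to_usf.py | freq_hi_to_note
-- ===== SOURCE A (Python) =====
-- FREQ_HI_PAL = [
--     0x01,0x01,0x01,0x01,0x01,0x01,0x01,0x01,0x01,0x01,0x01,0x02,
--     0x02,0x02,0x02,0x02,0x02,0x02,0x03,0x03,0x03,0x03,0x03,0x04,
--     0x04,0x04,0x04,0x05,0x05,0x05,0x06,0x06,0x06,0x07,0x07,0x08,
--     0x08,0x09,0x09,0x0A,0x0A,0x0B,0x0C,0x0D,0x0D,0x0E,0x0F,0x10,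
--     0x11,0x12,0x13,0x14,0x15,0x17,0x18,0x1A,0x1B,0x1D,0x1F,0x20,
--     0x22,0x24,0x27,0x29,0x2B,0x2E,0x31,0x34,0x37,0x3A,0x3E,0x41,
--     0x45,0x49,0x4E,0x52,0x57,0x5C,0x62,0x68,0x6E,0x75,0x7C,0x83,
--     0x8B,0x93,0x9C,0xA5,0xAF,0xB9,0xC4,0xD0,0xDD,0xEA,0xF8,0xFF]
--
-- def freq_hi_to_note(freq_hi):
--     """Map just a freq_hi byte to the nearest note.
--
--     This is what gt2_compare uses for note comparison — only freq_hi matters.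
--     Returns note number (0-95) or -1 if unmappable.
--     """
--     if freq_hi == 0:
--         return -1
--
--     best_note = -1
--     best_dist = float('inf')
--     for i, fh in enumerate(FREQ_HI_PAL):
--         dist = abs(freq_hi - fh)
--         if dist < best_dist:
--             best_dist = dist
--             best_note = i
--
--     return best_note
-- ===== SOURCE B (Python) =====
-- # Precomputed inverse table: NOTE_FOR_BYTE[v-1] is the nearest note for
-- # freq_hi byte v (ties toward the lower index); lookup with clamping.
-- NOTE_FOR_BYTE = [
--     0,11,18,23,27,30,33,35,37,39,41,42,43,45,46,
--     47,48,49,50,51,52,52,53,54,54,55,56,56,57,57,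
--     58,59,59,60,60,61,61,62,62,62,63,63,64,64,65,
--     65,65,66,66,66,67,67,67,68,68,68,69,69,69,69,
--     70,70,70,71,71,71,71,72,72,72,72,73,73,73,73,
--     74,74,74,74,74,75,75,75,75,76,76,76,76,76,77,
--     77,77,77,77,77,78,78,78,78,78,78,79,79,79,79,
--     79,79,80,80,80,80,80,80,81,81,81,81,81,81,81,
--     82,82,82,82,82,82,82,83,83,83,83,83,83,83,83,
--     84,84,84,84,84,84,84,84,85,85,85,85,85,85,85,
--     85,86,86,86,86,86,86,86,86,86,87,87,87,87,87,
--     87,87,87,87,87,88,88,88,88,88,88,88,88,88,88,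
--     89,89,89,89,89,89,89,89,89,89,90,90,90,90,90,
--     90,90,90,90,90,90,90,91,91,91,91,91,91,91,91,
--     91,91,91,91,92,92,92,92,92,92,92,92,92,92,92,
--     92,92,93,93,93,93,93,93,93,93,93,93,93,93,93,
--     93,94,94,94,94,94,94,94,94,94,94,95,95,95,95]
--
--
-- def freq_hi_to_note(freq_hi):
--     """Nearest note for a freq_hi byte via a precomputed lookup table;
--     out-of-range values clamp to the nearest end of the table."""
--     if freq_hi == 0:
--         return -1
--     v = min(max(freq_hi, 1), 255)
--     return NOTE_FOR_BYTE[v - 1]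
-- ===== Notes on version B (the rewrite author's own statement) =====
-- stated objective: faster
-- what changed: Replaces A's per-call linear scan of the frequency table (tracking the best distance seen) by a precomputed inverse lookup table indexed by the clamped byte value, so each call is a single array access.
import Mathlib
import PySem

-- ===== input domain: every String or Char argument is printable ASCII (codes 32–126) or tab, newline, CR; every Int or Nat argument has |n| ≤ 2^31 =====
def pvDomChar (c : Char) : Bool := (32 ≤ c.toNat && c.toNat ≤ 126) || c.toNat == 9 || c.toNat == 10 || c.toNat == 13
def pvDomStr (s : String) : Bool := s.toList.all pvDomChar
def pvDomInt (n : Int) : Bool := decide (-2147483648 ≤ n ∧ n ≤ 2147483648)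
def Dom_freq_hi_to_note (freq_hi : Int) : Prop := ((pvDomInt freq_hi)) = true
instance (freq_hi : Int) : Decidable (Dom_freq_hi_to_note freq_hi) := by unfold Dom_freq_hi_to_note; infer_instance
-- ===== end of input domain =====

-- B replaces A's per-call linear scan of the note table by a precomputed
-- inverse lookup table indexed by the clamped byte value (objective: faster).

-- ===== PORT A =====
def FREQ_HI_PAL : List Int := [
    0x01,0x01,0x01,0x01,0x01,0x01,0x01,0x01,0x01,0x01,0x01,0x02,
    0x02,0x02,0x02,0x02,0x02,0x02,0x03,0x03,0x03,0x03,0x03,0x04,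
    0x04,0x04,0x04,0x05,0x05,0x05,0x06,0x06,0x06,0x07,0x07,0x08,
    0x08,0x09,0x09,0x0A,0x0A,0x0B,0x0C,0x0D,0x0D,0x0E,0x0F,0x10,
    0x11,0x12,0x13,0x14,0x15,0x17,0x18,0x1A,0x1B,0x1D,0x1F,0x20,
    0x22,0x24,0x27,0x29,0x2B,0x2E,0x31,0x34,0x37,0x3A,0x3E,0x41,
    0x45,0x49,0x4E,0x52,0x57,0x5C,0x62,0x68,0x6E,0x75,0x7C,0x83,
    0x8B,0x93,0x9C,0xA5,0xAF,0xB9,0xC4,0xD0,0xDD,0xEA,0xF8,0xFF]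

-- loop body of A: state = (best_dist, best_note); best_dist = none plays float('inf')
def stepA (freq_hi : Int) (s : Option Int × Int) (p : Int × Int) : Option Int × Int :=
  let dist := |freq_hi - p.2|
  match s.1 with
  | none => (some dist, p.1)
  | some bd => if dist < bd then (some dist, p.1) else s

def freq_hi_to_note (freq_hi : Int) : Int :=
  if freq_hi = 0 then -1
  else ((PySem.List.enumerate FREQ_HI_PAL).foldl (stepA freq_hi) (none, -1)).2

-- ===== PORT B =====
-- precomputed table of Source B: NOTE_FOR_BYTE[v-1] = nearest note for byte v
def NOTE_FOR_BYTE : List Int := [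
    0,11,18,23,27,30,33,35,37,39,41,42,43,45,46,
    47,48,49,50,51,52,52,53,54,54,55,56,56,57,57,
    58,59,59,60,60,61,61,62,62,62,63,63,64,64,65,
    65,65,66,66,66,67,67,67,68,68,68,69,69,69,69,
    70,70,70,71,71,71,71,72,72,72,72,73,73,73,73,
    74,74,74,74,74,75,75,75,75,76,76,76,76,76,77,
    77,77,77,77,77,78,78,78,78,78,78,79,79,79,79,
    79,79,80,80,80,80,80,80,81,81,81,81,81,81,81,
    82,82,82,82,82,82,82,83,83,83,83,83,83,83,83,
    84,84,84,84,84,84,84,84,85,85,85,85,85,85,85,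
    85,86,86,86,86,86,86,86,86,86,87,87,87,87,87,
    87,87,87,87,87,88,88,88,88,88,88,88,88,88,88,
    89,89,89,89,89,89,89,89,89,89,90,90,90,90,90,
    90,90,90,90,90,90,90,91,91,91,91,91,91,91,91,
    91,91,91,91,92,92,92,92,92,92,92,92,92,92,92,
    92,92,93,93,93,93,93,93,93,93,93,93,93,93,93,
    93,94,94,94,94,94,94,94,94,94,94,95,95,95,95]

def freq_hi_to_note_alt (freq_hi : Int) : Int :=
  if freq_hi = 0 then -1
  else NOTE_FOR_BYTE.getD (min (max freq_hi 1) 255 - 1).toNat 0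

-- ===== PRECONDITION & SPEC =====
def Spec_freq_hi_to_note (freq_hi : Int) (out : Int) : Prop := out = freq_hi_to_note_alt freq_hi
instance (freq_hi : Int) (out : Int) : Decidable (Spec_freq_hi_to_note freq_hi out) := by unfold Spec_freq_hi_to_note; infer_instance

-- ===== CLAIM (what is proved, stated in full; the proofs are below) =====
def Claim_equal_freq_hi_to_note : Prop := ∀ (freq_hi : Int), Dom_freq_hi_to_note freq_hi → Spec_freq_hi_to_note freq_hi (freq_hi_to_note freq_hi)

-- ===== LEMMAS AND PROOFS =====

-- A's loop leaves its state untouched once no remaining distance beats the best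
theorem foldA_stay (x : Int) (l : List (Int × Int)) (bd i : Int)
    (h : ∀ p ∈ l, ¬ (|x - p.2| < bd)) :
    l.foldl (stepA x) (some bd, i) = (some bd, i) := by
  induction l with
  | nil => rfl
  | cons p t ih =>
    have hp := h p (by simp)
    simp only [List.foldl_cons, stepA, if_neg hp]
    exact ih (fun q hq => h q (by simp [hq]))

-- A's loop keeps a 'some' state whose distance satisfies any property closed
-- under the encountered distances
theorem foldA_inv (x : Int) (C : Int → Prop) (l : List (Int × Int)) (bd i : Int)
    (hbd : C bd) (hl : ∀ p ∈ l, C (|x - p.2|)) :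
    ∃ d j, l.foldl (stepA x) (some bd, i) = (some d, j) ∧ C d := by
  induction l generalizing bd i with
  | nil => exact ⟨bd, i, rfl, hbd⟩
  | cons p t ih =>
    simp only [List.foldl_cons, stepA]
    by_cases hc : |x - p.2| < bd
    · simp only [if_pos hc]
      exact ih _ _ (hl p (by simp)) (fun q hq => hl q (by simp [hq]))
    · simp only [if_neg hc]
      exact ih _ _ hbd (fun q hq => hl q (by simp [hq]))

-- the enumerated table, split for the symbolic cases
theorem enum_pal_cons :
    PySem.List.enumerate FREQ_HI_PAL = (0, (1:Int)) :: (PySem.List.enumerate FREQ_HI_PAL).tail := by decide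

theorem enum_tail_ge_one : ∀ p ∈ (PySem.List.enumerate FREQ_HI_PAL).tail, (1:Int) ≤ p.2 := by decide

theorem enum_pal_snoc :
    PySem.List.enumerate FREQ_HI_PAL =
      ((0, (1:Int)) :: (PySem.List.enumerate FREQ_HI_PAL).tail.dropLast) ++ [(95, (255:Int))] := by decide

theorem prefix_le_248 : ∀ p ∈ (0, (1:Int)) :: (PySem.List.enumerate FREQ_HI_PAL).tail.dropLast, p.2 ≤ 248 := by decide

-- A on negative input returns 0
theorem A_neg (x : Int) (hx : x < 0) : freq_hi_to_note x = 0 := by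
  unfold freq_hi_to_note
  rw [if_neg (by omega), enum_pal_cons]
  simp only [List.foldl_cons, stepA]
  rw [foldA_stay x _ _ _ (by
    intro p hp
    have h1 := enum_tail_ge_one p hp
    rw [abs_of_nonpos (show x - p.2 ≤ 0 by omega), abs_of_nonpos (show x - (1:Int) ≤ 0 by omega)]
    omega)]

-- A on input > 255 returns 95
theorem A_big (x : Int) (hx : 256 ≤ x) : freq_hi_to_note x = 95 := by
  unfold freq_hi_to_note
  rw [if_neg (by omega), enum_pal_snoc, List.foldl_append]
  simp only [List.foldl_cons, stepA]
  obtain ⟨d, j, hfold, hd⟩ := foldA_inv x (fun d => x - 248 ≤ d)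
      (PySem.List.enumerate FREQ_HI_PAL).tail.dropLast (|x - 1|) 0
      (by rw [abs_of_nonneg (by omega)]; omega)
      (by
        intro p hp
        have := prefix_le_248 p (by simp [hp])
        rw [abs_of_nonneg (by omega)]; omega)
  rw [hfold]
  simp only [List.foldl_nil]
  rw [if_pos (by rw [abs_of_nonneg (by omega)]; omega)]

-- B on negative input returns 0 (clamp to byte 1, table head)
theorem B_neg (x : Int) (hx : x < 0) : freq_hi_to_note_alt x = 0 := by
  unfold freq_hi_to_note_alt
  rw [if_neg (by omega)]
  have h1 : min (max x 1) 255 = 1 := by omega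
  rw [h1]
  decide

-- B on input > 255 returns 95 (clamp to byte 255, table last)
theorem B_big (x : Int) (hx : 256 ≤ x) : freq_hi_to_note_alt x = 95 := by
  unfold freq_hi_to_note_alt
  rw [if_neg (by omega)]
  have h1 : min (max x 1) 255 = 255 := by omega
  rw [h1]
  decide

-- the byte range is finite: check every value 1..255 by computation
set_option maxRecDepth 100000 in
theorem mid_range : ∀ k : Fin 255, freq_hi_to_note ((k : Nat) + 1 : Int) = freq_hi_to_note_alt ((k : Nat) + 1 : Int) := by decide

-- ===== VERDICT (by name: the statement is the Claim_ definition above) =====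
set_option maxRecDepth 100000 in
theorem freq_hi_to_note_spec : Claim_equal_freq_hi_to_note := by
  intro x _
  unfold Spec_freq_hi_to_note
  rcases lt_trichotomy x 0 with hneg | hz | hpos
  · rw [A_neg x hneg, B_neg x hneg]
  · subst hz
    simp only [freq_hi_to_note, freq_hi_to_note_alt, if_true]
  · rcases le_or_gt x 255 with hle | hgt
    · have hk : (x.toNat - 1) < 255 := by omega
      have := mid_range ⟨x.toNat - 1, hk⟩
      have hx : ((x.toNat - 1 : Nat) : Int) + 1 = x := by omega
      rwa [hx] at this
    · rw [A_big x (by omega), B_big x (by omega)]
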